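-- pv_equiv track=rewrite | github.com/Aman12x/DataPilot | agents/analyze/nodes.py | _known_schema_names
-- ===== SOURCE A (Python) =====
-- def _known_schema_names(schema_context: str) -> tuple[set[str], set[str]]:
--     """
--     Parse schema_context and return (known_tables, known_columns) — both lowercased.
--     Used for MetricConfig column validation after LLM inference.
--     """
--     known_tables:  set[str] = set()
--     known_columns: set[str] = set()
--     current: str | None = None
--     for line in schema_context.splitlines():
--         s = line.strip()
--         if s.startswith("TABLE:"):
--             current = s.split(":", 1)[1].strip().lower()
--             known_tables.add(current)
--         elif current and s and not s.startswith("--") and not s.startswith("DIALECT"):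
--             col = s.split()[0].lower()
--             if col:
--                 known_columns.add(col)
--     return known_tables, known_columns
-- ===== SOURCE B (Python) =====
-- def _is_header(s):
--     return s.startswith("TABLE:")
--
--
-- def _name(header):
--     return header.split(":", 1)[1].strip().lower()
--
--
-- def _blocks(lines):
--     """Group stripped lines into (header, body) blocks; lines before the first header are dropped."""
--     blocks = []
--     i = 0
--     while i < len(lines):
--         if _is_header(lines[i]):
--             j = i + 1
--             while j < len(lines) and not _is_header(lines[j]):
--                 j += 1
--             blocks.append((lines[i], lines[i + 1:j]))
--             i = j
--         else:
--             i += 1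
--     return blocks
--
--
-- def _known_schema_names(schema_context: str) -> tuple[set[str], set[str]]:
--     stripped = [ln.strip() for ln in schema_context.splitlines()]
--     blocks = _blocks(stripped)
--     tables = {_name(h) for h, _ in blocks}
--     columns = set()
--     for h, body in blocks:
--         if _name(h):
--             for s in body:
--                 if s and not s.startswith("--") and not s.startswith("DIALECT"):
--                     col = s.split()[0].lower()
--                     if col:
--                         columns.add(col)
--     return tables, columns
-- ===== Notes on version B (the rewrite author's own statement) =====
-- stated objective: alternative
-- what changed: Replaces A's single pass with a mutable `current` table variable by explicitly grouping the stripped lines into (header, body) blocks and then deriving the table set and the column set from the block list.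
import Mathlib
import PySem

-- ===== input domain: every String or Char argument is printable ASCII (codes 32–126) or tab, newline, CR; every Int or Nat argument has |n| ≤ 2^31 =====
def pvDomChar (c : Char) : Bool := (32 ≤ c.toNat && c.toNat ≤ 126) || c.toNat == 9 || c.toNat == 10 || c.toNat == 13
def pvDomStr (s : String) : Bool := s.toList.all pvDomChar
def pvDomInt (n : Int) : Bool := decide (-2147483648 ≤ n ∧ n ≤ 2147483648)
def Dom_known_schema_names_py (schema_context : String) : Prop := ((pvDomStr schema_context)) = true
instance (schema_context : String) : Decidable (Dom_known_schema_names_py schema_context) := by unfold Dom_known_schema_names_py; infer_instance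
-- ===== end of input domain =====

-- B replaces A's single pass with a mutable `current` table by an explicit grouping of the
-- lines into (header, body) blocks, then derives tables and columns from the blocks (objective: alternative decomposition).

-- ===== PORT A =====
-- shared sub-expressions of both Pythons, named once:
-- pvIsHeader s = s.startswith("TABLE:"); pvName h = h.split(":",1)[1].strip().lower()
def pvIsHeader (s : String) : Bool := PySem.Str.startswith s "TABLE:"
-- the pyGetD default "" is unreachable: the header starts with "TABLE:" so ":" occurs and split gives 2 pieces
def pvName (h : String) : String :=
  PySem.Str.lower (PySem.Str.strip (PySem.List.pyGetD ((PySem.Str.splitMax? h ":" 1).getD []) 1 ""))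

-- the loop body of A (state = (known_tables, known_columns, current))
def pvStepA (st : PySem.Set String × PySem.Set String × Option String) (s : String) :
    PySem.Set String × PySem.Set String × Option String :=
  match st with
  | (kt, kc, cur) =>
    if pvIsHeader s then
      let current := pvName s
      (PySem.Set.add kt current, kc, some current)
    else if (match cur with | some c => c ≠ "" | none => false) && s ≠ ""
            && !PySem.Str.startswith s "--" && !PySem.Str.startswith s "DIALECT" then
      -- the pyGetD default "" is unreachable: s is a nonempty stripped line, so s.split() is nonempty
      let col := PySem.Str.lower (PySem.List.pyGetD (PySem.Str.split₀ s) 0 "")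
      if col ≠ "" then (kt, PySem.Set.add kc col, cur) else (kt, kc, cur)
    else (kt, kc, cur)

def known_schema_names_py (schema_context : String) : List String × List String :=
  let res := (PySem.Str.splitlines schema_context).foldl
    (fun st line => pvStepA st (PySem.Str.strip line)) ([], [], none)
  (res.1, res.2.1)

-- ===== PORT B =====
def pvBlocks : List String → List (String × List String)
  | [] => []
  | s :: rest =>
    if pvIsHeader s then
      (s, rest.takeWhile (fun t => !pvIsHeader t)) :: pvBlocks (rest.dropWhile (fun t => !pvIsHeader t))
    else pvBlocks rest
termination_by ls => ls.length
decreasing_by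
  · exact Nat.lt_succ_of_le (List.length_dropWhile_le _ _)
  · simp

-- body of B's inner column loop
def pvAddCol (kc : PySem.Set String) (s : String) : PySem.Set String :=
  if s ≠ "" && !PySem.Str.startswith s "--" && !PySem.Str.startswith s "DIALECT" then
    let col := PySem.Str.lower (PySem.List.pyGetD (PySem.Str.split₀ s) 0 "")
    if col ≠ "" then PySem.Set.add kc col else kc
  else kc

-- body of B's per-block loop: add the block's body columns when the table name is truthy
def pvBlockStep (kc : PySem.Set String) (b : String × List String) : PySem.Set String :=
  if pvName b.1 ≠ "" then b.2.foldl pvAddCol kc else kc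

def known_schema_names_py_alt (schema_context : String) : List String × List String :=
  let stripped := (PySem.Str.splitlines schema_context).map PySem.Str.strip
  let blocks := pvBlocks stripped
  let tables := PySem.Set.ofList (blocks.map (fun b => pvName b.1))
  let columns := blocks.foldl pvBlockStep []
  (tables, columns)

-- ===== PRECONDITION & SPEC =====
def Spec_known_schema_names_py (schema_context : String) (out : List String × List String) : Prop := out = known_schema_names_py_alt schema_context
instance (schema_context : String) (out : List String × List String) : Decidable (Spec_known_schema_names_py schema_context out) := by unfold Spec_known_schema_names_py; infer_instance

-- ===== CLAIM (what is proved, stated in full; the proofs are below) =====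
def Claim_equal_known_schema_names_py : Prop := ∀ (schema_context : String), Dom_known_schema_names_py schema_context → Spec_known_schema_names_py schema_context (known_schema_names_py schema_context)

-- ===== LEMMAS AND PROOFS =====

-- A's step on a non-header line with a truthy current table is exactly B's column step
lemma pvStepA_nonheader (kt kc : PySem.Set String) (c s : String) (h : pvIsHeader s = false) :
    pvStepA (kt, kc, some c) s = (kt, if c ≠ "" then pvAddCol kc s else kc, some c) := by
  by_cases hc : c = "" <;> simp [pvStepA, pvAddCol, h, hc]
  split_ifs <;> simp_all

-- running A's loop over a run of non-header lines keeps tables and current, folds columns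
lemma pvFoldA_body (body : List String) (h : ∀ s ∈ body, pvIsHeader s = false) :
    ∀ (kt kc : PySem.Set String) (c : String),
    body.foldl pvStepA (kt, kc, some c) =
      (kt, if c ≠ "" then body.foldl pvAddCol kc else kc, some c) := by
  induction body with
  | nil => intro kt kc c; simp
  | cons s rest ih =>
    intro kt kc c
    have hs : pvIsHeader s = false := h s (by simp)
    have hrest : ∀ t ∈ rest, pvIsHeader t = false := fun t ht => h t (by simp [ht])
    rw [List.foldl_cons, pvStepA_nonheader kt kc c s hs, ih hrest]
    by_cases hc : c = "" <;> simp [hc]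

-- main invariant: from a state whose current table is none, or at a list starting with a header,
-- A's fold computes exactly the block decomposition's tables and columns
lemma pvFoldA_main : ∀ (ls : List String) (kt kc : PySem.Set String) (cur : Option String),
    (cur = none ∨ (match ls with | [] => True | s :: _ => pvIsHeader s = true)) →
    (ls.foldl pvStepA (kt, kc, cur)).1 = PySem.Set.update kt ((pvBlocks ls).map (fun b => pvName b.1))
    ∧ (ls.foldl pvStepA (kt, kc, cur)).2.1 = (pvBlocks ls).foldl pvBlockStep kc := by
  intro ls
  induction ls using pvBlocks.induct with
  | case1 => intro kt kc cur _; simp [pvBlocks, PySem.Set.update]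
  | case2 s rest hs ih =>
    intro kt kc cur _
    have hstep : pvStepA (kt, kc, cur) s =
        (PySem.Set.add kt (pvName s), kc, some (pvName s)) := by
      cases cur <;> simp [pvStepA, hs]
    have hsplit : rest = rest.takeWhile (fun t => !pvIsHeader t)
        ++ rest.dropWhile (fun t => !pvIsHeader t) := (List.takeWhile_append_dropWhile ..).symm
    have htake : ∀ t ∈ rest.takeWhile (fun t => !pvIsHeader t), pvIsHeader t = false := by
      intro t ht
      have := List.mem_takeWhile_imp ht
      simpa using this
    have hdropHead : (Option.isNone (rest.dropWhile (fun t => !pvIsHeader t)).head?) = true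
        ∨ (match rest.dropWhile (fun t => !pvIsHeader t) with
            | [] => True | s :: _ => pvIsHeader s = true) := by
      cases hd : rest.dropWhile (fun t => !pvIsHeader t) with
      | nil => left; rfl
      | cons x xs =>
        right
        have := List.head?_dropWhile_not (fun t => !pvIsHeader t) rest
        rw [hd] at this
        simpa using this
    have hpre : (some (pvName s) : Option String) = none
        ∨ (match rest.dropWhile (fun t => !pvIsHeader t) with
            | [] => True | s :: _ => pvIsHeader s = true) := by
      rcases hdropHead with h1 | h1
      · right
        cases hd : rest.dropWhile (fun t => !pvIsHeader t) with
        | nil => trivial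
        | cons x xs => rw [hd] at h1; simp at h1
      · right; exact h1
    have ihd := ih (PySem.Set.add kt (pvName s))
      (if pvName s ≠ "" then (rest.takeWhile (fun t => !pvIsHeader t)).foldl pvAddCol kc else kc)
      (some (pvName s)) hpre
    have hrun : List.foldl pvStepA (PySem.Set.add kt (pvName s), kc, some (pvName s)) rest
        = List.foldl pvStepA (PySem.Set.add kt (pvName s),
            (if pvName s ≠ "" then (rest.takeWhile (fun t => !pvIsHeader t)).foldl pvAddCol kc else kc),
            some (pvName s)) (rest.dropWhile (fun t => !pvIsHeader t)) := by
      conv_lhs => rw [hsplit]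
      rw [List.foldl_append, pvFoldA_body _ htake]
    have hblk : pvBlocks (s :: rest)
        = (s, rest.takeWhile (fun t => !pvIsHeader t)) ::
            pvBlocks (rest.dropWhile (fun t => !pvIsHeader t)) := by
      rw [pvBlocks, if_pos hs]
    constructor
    · rw [List.foldl_cons, hstep, hrun, hblk]
      simpa [PySem.Set.update] using ihd.1
    · rw [List.foldl_cons, hstep, hrun, hblk]
      simpa [pvBlockStep] using ihd.2
  | case3 s rest hs ih =>
    intro kt kc cur hcur
    have hcn : cur = none := by
      rcases hcur with h | h
      · exact h
      · simp [hs] at h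
    subst hcn
    have hstep : pvStepA (kt, kc, none) s = (kt, kc, none) := by
      simp [pvStepA, hs]
    rw [List.foldl_cons, hstep, pvBlocks, if_neg (by simp [hs])]
    exact ih kt kc none (Or.inl rfl)

-- ===== VERDICT (by name: the statement is the Claim_ definition above) =====
theorem known_schema_names_py_spec : Claim_equal_known_schema_names_py := by
  intro sc _
  show known_schema_names_py sc = known_schema_names_py_alt sc
  have hmain := pvFoldA_main ((PySem.Str.splitlines sc).map PySem.Str.strip) [] [] none (Or.inl rfl)
  have hA : known_schema_names_py sc =
      ((((PySem.Str.splitlines sc).map PySem.Str.strip).foldl pvStepA ([], [], none)).1,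
       (((PySem.Str.splitlines sc).map PySem.Str.strip).foldl pvStepA ([], [], none)).2.1) := by
    rw [known_schema_names_py]
    rw [List.foldl_map]
  rw [hA, known_schema_names_py_alt]
  exact Prod.ext
    (by simpa [PySem.Set.update, PySem.Set.ofList_eq_foldl] using hmain.1)
    (hmain.2)
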